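/- GENERATED by mk_final_copies.py from the proof of the farm's unit `get32_packet` (farm:get32_packet.1: Proof.lean) as the
   re-elaboration sweep compiled it — do not edit. -/
import Asan.CheckWalk
import Vorbis.Spec.ReaderLemmas
import Vorbis.Spec.Units.get32_packet

open X86 X86.User Asan Vorbis

set_option maxRecDepth 4000
set_option maxHeartbeats 4000000

/-- `get32_packet(f)` satisfies its contract: four calls of `get8_packet` in sequence (10d109, 10d113, 10d120, 10d12d), the
results combined by `shl` / `add` in ebx. After every call the same facts are restated about the returned state `s_<addr>r`:
the three stack slots (saved rbp, saved rbx, the return address: `hs1_k hs2_k hs0_k`), the footprint since the entry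
(`hsame<k>`: the own stack window and get8_packet's six windows of `*f`), `hun<k>` (no store to the shadow), `hrp<k>`
(`ReaderPost` chained from the entry: `Bits f` now, μ not larger), DF and the MXCSR masks. The precondition of the next call is
`ReaderPre.again` with `Bits` carried over the push of the return address (`Reader.store_off_obj`). The result is ANY 32-bit value:
`add eax, ebx` zero-extends into rax. `valid_bits = 0` is the last callee's post. -/
theorem Vorbis.Spec.Worked.get32_packet_ok : Vorbis.Spec.get32_packet.Statement := by
  intro Lay hLay μ hμ u₀ hcode h_g8 others frames Blk len u ret he hpre
  v_entry he
  have hg8 := h_g8 others frames Blk len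
  have hsp := hpre.shadow.rsp
  have hwhere := hpre.where_obj
  u_walk hcode [hμ.vendor] span [Vorbis.L.textLo, Vorbis.L.textHi] side (v_side)
  case call_inv =>
    v_inv
  case pre_10d109 =>
    have hun : ShadowUntouched u.mem s_10d109.mem := by v_untouched
    have hrdi : s_10d109.reg .rdi = u.reg .rdi := w_kept.get .rdi rfl
    refine hpre.again (hpre.shadow.call hun (by u_omega) (by u_omega) (by u_omega)) hrdi ?_
    have hsame : Mem.SameExcept [⟨(u.reg .rsp).toNat - 32, (u.reg .rsp).toNat⟩] u.mem s_10d109.mem := by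
      u_same
    exact (Vorbis.Spec.Reader.reader_of_window hpre.bits hsame (by omega)).1
  -- 10d10e: the state the first callee returned
  have w_eq := Vorbis.conv_code_eqOn w_code
  have c_rdi : s_10d109.reg .rdi = u.reg .rdi := w_kept_10d109.get .rdi rfl
  simp only [X86.User.Spec.footprint, vspec, w_rsp_10d109, c_rdi] at w_same
  have hp1 : UInt64.ofNat (s_10d109.mem.readLE (u.reg .rsp - 8) 8) = u.reg .rbp := by u_resolve
  have hp2 : UInt64.ofNat (s_10d109.mem.readLE (u.reg .rsp - 16) 8) = u.reg .rbx := by u_resolve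
  have hp0 : UInt64.ofNat (s_10d109.mem.readLE (u.reg .rsp) 8) = ret := by u_resolve
  have hs1_1 : UInt64.ofNat (s_10d109r.mem.readLE (u.reg .rsp - 8) 8) = u.reg .rbp := by u_frame hp1
  have hs2_1 : UInt64.ofNat (s_10d109r.mem.readLE (u.reg .rsp - 16) 8) = u.reg .rbx := by u_frame hp2
  have hs0_1 : UInt64.ofNat (s_10d109r.mem.readLE (u.reg .rsp) 8) = ret := by u_frame hp0
  clear hp1 hp2 hp0
  rw [w_mem_10d109] at w_same
  have hpost : Vorbis.Spec.Get8PacketPost Blk len (s_10d109.reg .rdi).toNat s_10d109 s_10d109r := w_post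
  rw [c_rdi] at hpost
  have hS01 : Mem.SameExcept [⟨(u.reg .rsp).toNat - 32, (u.reg .rsp).toNat⟩] u.mem s_10d109.mem := by
    u_same
  have hkeep1 := Vorbis.Spec.Reader.reader_of_window hpre.bits hS01 (by omega)
  have hrp1 : ReaderPost Blk len u.mem s_10d109r.mem (u.reg .rdi).toNat :=
    ReaderPost.trans ⟨hkeep1.1, Nat.le_of_eq hkeep1.2⟩ hpost.reader
  have hsame1 : Mem.SameExcept
      [⟨(u.reg .rsp).toNat - 320, (u.reg .rsp).toNat⟩,
       ⟨(u.reg .rdi).toNat + 48, (u.reg .rdi).toNat + 56⟩, ⟨(u.reg .rdi).toNat + 84, (u.reg .rdi).toNat + 96⟩,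
       ⟨(u.reg .rdi).toNat + 136, (u.reg .rdi).toNat + 144⟩, ⟨(u.reg .rdi).toNat + 1484, (u.reg .rdi).toNat + 1749⟩,
       ⟨(u.reg .rdi).toNat + 1752, (u.reg .rdi).toNat + 1764⟩, ⟨(u.reg .rdi).toNat + 1768, (u.reg .rdi).toNat + 1784⟩]
      u.mem s_10d109r.mem := by
    u_same
  have hun1 : ShadowUntouched u.mem s_10d109r.mem := by v_untouched
  have hdf1 : s_10d109r.flags .df = false := (show X86.User.abiInv _ from w_inv).1
  have hmx1 : s_10d109r.mxcsr &&& 8064 = 8064 := (show X86.User.abiInv _ from w_inv).2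
  have hsse1 := Vorbis.sseOK_of_abiInv w_inv
  clear w_same hS01 hkeep1 hpost w_post
  -- 10d10e … 10d113: `mov ebx, eax ; mov rdi, rbp ; call get8_packet` (stb_vorbis_fixed.c:1613)
  u_walk hcode [hμ.vendor] span [Vorbis.L.textLo, Vorbis.L.textHi] side (v_side)
  case call_inv =>
    v_inv
  case pre_10d113 =>
    have hun : ShadowUntouched u.mem s_10d113.mem := by v_untouched
    have hsh' : ShadowPre others frames s_10d113 :=
      hpre.shadow.call hun (by u_omega) (by u_omega) (by u_omega)
    have hkeep := Vorbis.Spec.Reader.store_off_obj hrp1.bits (u.reg .rsp - 32) 8 1102104 (by u_omega) (by u_omega)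
    rw [← w_mem] at hkeep
    exact hpre.again hsh' w_rdi hkeep.1.bits
  -- 10d118: the state the callee returned
  have w_eq := Vorbis.conv_code_eqOn w_code
  simp only [X86.User.Spec.footprint, vspec, w_rsp_10d113, w_rdi_10d113] at w_same
  have hkeep2 := Vorbis.Spec.Reader.store_off_obj hrp1.bits (u.reg .rsp - 32) 8 1102104 (by u_omega) (by u_omega)
  rw [← w_mem_10d113] at hkeep2
  rw [w_mem_10d113] at w_same
  have hs1_2 : UInt64.ofNat (s_10d113r.mem.readLE (u.reg .rsp - 8) 8) = u.reg .rbp := by u_frame hs1_1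
  have hs2_2 : UInt64.ofNat (s_10d113r.mem.readLE (u.reg .rsp - 16) 8) = u.reg .rbx := by u_frame hs2_1
  have hs0_2 : UInt64.ofNat (s_10d113r.mem.readLE (u.reg .rsp) 8) = ret := by u_frame hs0_1
  have hpost : Vorbis.Spec.Get8PacketPost Blk len (s_10d113.reg .rdi).toNat s_10d113 s_10d113r := w_post
  rw [w_rdi_10d113] at hpost
  have hrp2 : ReaderPost Blk len u.mem s_10d113r.mem (u.reg .rdi).toNat :=
    (hrp1.trans hkeep2.1).trans hpost.reader
  have hsame2 : Mem.SameExcept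
      [⟨(u.reg .rsp).toNat - 320, (u.reg .rsp).toNat⟩,
       ⟨(u.reg .rdi).toNat + 48, (u.reg .rdi).toNat + 56⟩, ⟨(u.reg .rdi).toNat + 84, (u.reg .rdi).toNat + 96⟩,
       ⟨(u.reg .rdi).toNat + 136, (u.reg .rdi).toNat + 144⟩, ⟨(u.reg .rdi).toNat + 1484, (u.reg .rdi).toNat + 1749⟩,
       ⟨(u.reg .rdi).toNat + 1752, (u.reg .rdi).toNat + 1764⟩, ⟨(u.reg .rdi).toNat + 1768, (u.reg .rdi).toNat + 1784⟩]
      u.mem s_10d113r.mem := by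
    u_same
  have hun2 : ShadowUntouched u.mem s_10d113r.mem := by v_untouched
  have hdf2 : s_10d113r.flags .df = false := (show X86.User.abiInv _ from w_inv).1
  have hmx2 : s_10d113r.mxcsr &&& 8064 = 8064 := (show X86.User.abiInv _ from w_inv).2
  have hsse2 := Vorbis.sseOK_of_abiInv w_inv
  clear w_same hkeep2 hs1_1 hs2_1 hs0_1 hrp1 hsame1 hun1 hpost w_post
  -- 10d118 … 10d120: `shl eax, 8 ; add ebx, eax ; mov rdi, rbp ; call get8_packet` (stb_vorbis_fixed.c:1614)
  u_walk hcode [hμ.vendor] span [Vorbis.L.textLo, Vorbis.L.textHi] side (v_side)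
  case call_inv =>
    v_inv
  case pre_10d120 =>
    have hun : ShadowUntouched u.mem s_10d120.mem := by v_untouched
    have hsh' : ShadowPre others frames s_10d120 :=
      hpre.shadow.call hun (by u_omega) (by u_omega) (by u_omega)
    have hkeep := Vorbis.Spec.Reader.store_off_obj hrp2.bits (u.reg .rsp - 32) 8 1102117 (by u_omega) (by u_omega)
    rw [← w_mem] at hkeep
    exact hpre.again hsh' w_rdi hkeep.1.bits
  -- 10d125: the state the callee returned
  have w_eq := Vorbis.conv_code_eqOn w_code
  simp only [X86.User.Spec.footprint, vspec, w_rsp_10d120, w_rdi_10d120] at w_same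
  have hkeep3 := Vorbis.Spec.Reader.store_off_obj hrp2.bits (u.reg .rsp - 32) 8 1102117 (by u_omega) (by u_omega)
  rw [← w_mem_10d120] at hkeep3
  rw [w_mem_10d120] at w_same
  have hs1_3 : UInt64.ofNat (s_10d120r.mem.readLE (u.reg .rsp - 8) 8) = u.reg .rbp := by u_frame hs1_2
  have hs2_3 : UInt64.ofNat (s_10d120r.mem.readLE (u.reg .rsp - 16) 8) = u.reg .rbx := by u_frame hs2_2
  have hs0_3 : UInt64.ofNat (s_10d120r.mem.readLE (u.reg .rsp) 8) = ret := by u_frame hs0_2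
  have hpost : Vorbis.Spec.Get8PacketPost Blk len (s_10d120.reg .rdi).toNat s_10d120 s_10d120r := w_post
  rw [w_rdi_10d120] at hpost
  have hrp3 : ReaderPost Blk len u.mem s_10d120r.mem (u.reg .rdi).toNat :=
    (hrp2.trans hkeep3.1).trans hpost.reader
  have hsame3 : Mem.SameExcept
      [⟨(u.reg .rsp).toNat - 320, (u.reg .rsp).toNat⟩,
       ⟨(u.reg .rdi).toNat + 48, (u.reg .rdi).toNat + 56⟩, ⟨(u.reg .rdi).toNat + 84, (u.reg .rdi).toNat + 96⟩,
       ⟨(u.reg .rdi).toNat + 136, (u.reg .rdi).toNat + 144⟩, ⟨(u.reg .rdi).toNat + 1484, (u.reg .rdi).toNat + 1749⟩,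
       ⟨(u.reg .rdi).toNat + 1752, (u.reg .rdi).toNat + 1764⟩, ⟨(u.reg .rdi).toNat + 1768, (u.reg .rdi).toNat + 1784⟩]
      u.mem s_10d120r.mem := by
    u_same
  have hun3 : ShadowUntouched u.mem s_10d120r.mem := by v_untouched
  have hdf3 : s_10d120r.flags .df = false := (show X86.User.abiInv _ from w_inv).1
  have hmx3 : s_10d120r.mxcsr &&& 8064 = 8064 := (show X86.User.abiInv _ from w_inv).2
  have hsse3 := Vorbis.sseOK_of_abiInv w_inv
  clear w_same hkeep3 hs1_2 hs2_2 hs0_2 hrp2 hsame2 hun2 hpost w_post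
  -- 10d125 … 10d12d: `shl eax, 16 ; add ebx, eax ; mov rdi, rbp ; call get8_packet` (stb_vorbis_fixed.c:1615)
  u_walk hcode [hμ.vendor] span [Vorbis.L.textLo, Vorbis.L.textHi] side (v_side)
  case call_inv =>
    v_inv
  case pre_10d12d =>
    have hun : ShadowUntouched u.mem s_10d12d.mem := by v_untouched
    have hsh' : ShadowPre others frames s_10d12d :=
      hpre.shadow.call hun (by u_omega) (by u_omega) (by u_omega)
    have hkeep := Vorbis.Spec.Reader.store_off_obj hrp3.bits (u.reg .rsp - 32) 8 1102130 (by u_omega) (by u_omega)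
    rw [← w_mem] at hkeep
    exact hpre.again hsh' w_rdi hkeep.1.bits
  -- 10d132: the state the callee returned
  have w_eq := Vorbis.conv_code_eqOn w_code
  simp only [X86.User.Spec.footprint, vspec, w_rsp_10d12d, w_rdi_10d12d] at w_same
  have hkeep4 := Vorbis.Spec.Reader.store_off_obj hrp3.bits (u.reg .rsp - 32) 8 1102130 (by u_omega) (by u_omega)
  rw [← w_mem_10d12d] at hkeep4
  rw [w_mem_10d12d] at w_same
  have hs1_4 : UInt64.ofNat (s_10d12dr.mem.readLE (u.reg .rsp - 8) 8) = u.reg .rbp := by u_frame hs1_3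
  have hs2_4 : UInt64.ofNat (s_10d12dr.mem.readLE (u.reg .rsp - 16) 8) = u.reg .rbx := by u_frame hs2_3
  have hs0_4 : UInt64.ofNat (s_10d12dr.mem.readLE (u.reg .rsp) 8) = ret := by u_frame hs0_3
  have hpost : Vorbis.Spec.Get8PacketPost Blk len (s_10d12d.reg .rdi).toNat s_10d12d s_10d12dr := w_post
  rw [w_rdi_10d12d] at hpost
  have hrp4 : ReaderPost Blk len u.mem s_10d12dr.mem (u.reg .rdi).toNat :=
    (hrp3.trans hkeep4.1).trans hpost.reader
  have hsame4 : Mem.SameExcept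
      [⟨(u.reg .rsp).toNat - 320, (u.reg .rsp).toNat⟩,
       ⟨(u.reg .rdi).toNat + 48, (u.reg .rdi).toNat + 56⟩, ⟨(u.reg .rdi).toNat + 84, (u.reg .rdi).toNat + 96⟩,
       ⟨(u.reg .rdi).toNat + 136, (u.reg .rdi).toNat + 144⟩, ⟨(u.reg .rdi).toNat + 1484, (u.reg .rdi).toNat + 1749⟩,
       ⟨(u.reg .rdi).toNat + 1752, (u.reg .rdi).toNat + 1764⟩, ⟨(u.reg .rdi).toNat + 1768, (u.reg .rdi).toNat + 1784⟩]
      u.mem s_10d12dr.mem := by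
    u_same
  have hun4 : ShadowUntouched u.mem s_10d12dr.mem := by v_untouched
  have hdf4 : s_10d12dr.flags .df = false := (show X86.User.abiInv _ from w_inv).1
  have hmx4 : s_10d12dr.mxcsr &&& 8064 = 8064 := (show X86.User.abiInv _ from w_inv).2
  have hsse4 := Vorbis.sseOK_of_abiInv w_inv
  clear w_same hkeep4 hs1_3 hs2_3 hs0_3 hrp3 hsame3 hun3 w_post
  -- 10d132 … 10d13d: `shl eax, 24 ; add eax, ebx ; add rsp, 8 ; pop rbx ; pop rbp ; ret` (stb_vorbis_fixed.c:1615-1617)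
  u_walk hcode [hμ.vendor] span [Vorbis.L.textLo, Vorbis.L.textHi] side (v_side)
  refine ReachVia.done ?_
  v_returned
  -- the postcondition
  show Vorbis.Spec.Get32PacketPost Blk len (u.reg .rdi).toNat u s_10d13d
  refine ⟨?_, ?_, ?_, ?_⟩
  · -- no store went to the shadow
    rw [w_mem]
    exact hun4
  · -- `Bits f` kept, μ not increased: chained over the four callees
    rw [w_mem]
    exact hrp4
  · -- eax is the result of a 32-bit `add`: rax is zero-extended
    rw [w_rax, Vorbis.Spec.GetBits.ofBV32_toNat]
    exact BitVec.isLt _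
  · -- `valid_bits = 0`: the last callee's post, nothing stored since
    rw [w_mem]
    exact hpost.validBits
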